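-- pv_equiv track=rewrite | github.com/the-jordan-lab/VecMap | vecmap/applications/barcode.py | deduplicate_umis
-- ===== SOURCE A (Python) =====
-- from typing import List, Dict, Tuple, Set, Optional
-- from collections import defaultdict, Counter
--
-- def deduplicate_umis(
--                     barcode_umi_gene_tuples: List[Tuple[str, str, str]]) -> Dict[str, Dict[str, int]]:
--     """
--     Deduplicate UMIs per barcode per gene.
--
--     Args:
--         barcode_umi_gene_tuples: List of (barcode, umi, gene) tuples
--
--     Returns:
--         Dict mapping barcode -> gene -> unique UMI count
--     """
--     # Group by barcode and gene
--     barcode_gene_umis = defaultdict(lambda: defaultdict(set))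
--
--     for barcode, umi, gene in barcode_umi_gene_tuples:
--         barcode_gene_umis[barcode][gene].add(umi)
--
--     # Count unique UMIs
--     counts = {}
--     for barcode, gene_umis in barcode_gene_umis.items():
--         counts[barcode] = {
--             gene: len(umis) for gene, umis in gene_umis.items()
--         }
--
--     return counts
-- ===== SOURCE B (Python) =====
-- def deduplicate_umis(barcode_umi_gene_tuples):
--     seen = set()
--     counts = {}
--     for barcode, umi, gene in barcode_umi_gene_tuples:
--         key = (barcode, gene, umi)
--         if key not in seen:
--             seen.add(key)
--             inner = counts.setdefault(barcode, {})
--             inner[gene] = inner.get(gene, 0) + 1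
--     return counts
-- ===== Notes on version B (the rewrite author's own statement) =====
-- stated objective: alternative
-- what changed: Replaces A's two-phase group-then-count (nested defaultdicts of UMI sets, then a second pass building the counts dict) with a single pass that deduplicates (barcode, gene, umi) triples through one flat 'seen' set and increments the nested count in place, never materialising per-gene UMI sets.
import Mathlib
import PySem

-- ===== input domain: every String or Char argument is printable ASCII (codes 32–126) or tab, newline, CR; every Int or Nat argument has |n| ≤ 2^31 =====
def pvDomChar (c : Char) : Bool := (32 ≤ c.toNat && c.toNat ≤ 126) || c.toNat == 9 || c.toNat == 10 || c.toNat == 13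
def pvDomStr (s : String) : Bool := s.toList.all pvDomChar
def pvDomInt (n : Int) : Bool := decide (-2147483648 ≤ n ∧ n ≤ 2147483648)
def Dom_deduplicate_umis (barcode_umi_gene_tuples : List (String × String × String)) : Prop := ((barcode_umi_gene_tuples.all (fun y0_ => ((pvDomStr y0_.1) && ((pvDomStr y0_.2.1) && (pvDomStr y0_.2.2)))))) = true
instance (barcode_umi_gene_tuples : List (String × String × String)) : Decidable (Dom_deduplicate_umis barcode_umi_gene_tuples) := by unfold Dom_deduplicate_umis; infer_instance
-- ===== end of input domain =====

-- B replaces A's two-phase group-then-count (nested dicts of UMI sets, then a counting pass)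
-- with one pass over a flat 'seen' set of (barcode, gene, umi) triples, incrementing counts directly
-- (objective: alternative decomposition, same asymptotic cost).

-- ===== PORT A =====
-- loop body of A's grouping pass: barcode_gene_umis[barcode][gene].add(umi)
def pvStepA (d : PySem.Dict String (PySem.Dict String (PySem.Set String)))
    (t : String × String × String) : PySem.Dict String (PySem.Dict String (PySem.Set String)) :=
  let inner := d.getD t.1 PySem.Dict.empty
  d.insert t.1 (inner.insert t.2.2 (PySem.Set.add (inner.getD t.2.2 PySem.Set.empty) t.2.1))

def deduplicate_umis (barcode_umi_gene_tuples : List (String × String × String)) : List (String × List (String × Int)) :=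
  -- Group by barcode and gene (defaultdict of defaultdict of set)
  let barcode_gene_umis := barcode_umi_gene_tuples.foldl pvStepA PySem.Dict.empty
  -- Count unique UMIs: counts[barcode] = {gene: len(umis) for gene, umis in gene_umis.items()}
  let counts : PySem.Dict String (PySem.Dict String Int) :=
    barcode_gene_umis.items.foldl
      (fun c p => c.insert p.1 (PySem.Dict.ofList (p.2.items.map (fun q => (q.1, (q.2.length : Int))))))
      PySem.Dict.empty
  counts.items.map (fun p => (p.1, p.2.items))

-- ===== PORT B =====
-- loop body of B: skip seen (barcode, gene, umi) triples, else record and increment the count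
def pvStepB (st : PySem.Set (String × String × String) × PySem.Dict String (PySem.Dict String Int))
    (t : String × String × String) : PySem.Set (String × String × String) × PySem.Dict String (PySem.Dict String Int) :=
  if PySem.Set.contains st.1 (t.1, t.2.2, t.2.1) then st
  else
    let inner := st.2.getD t.1 PySem.Dict.empty
    (PySem.Set.add st.1 (t.1, t.2.2, t.2.1),
     st.2.insert t.1 (inner.insert t.2.2 (inner.getD t.2.2 0 + 1)))

def deduplicate_umis_alt (barcode_umi_gene_tuples : List (String × String × String)) : List (String × List (String × Int)) :=
  let st := barcode_umi_gene_tuples.foldl pvStepB (PySem.Set.empty, PySem.Dict.empty)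
  st.2.items.map (fun p => (p.1, p.2.items))

-- ===== PRECONDITION & SPEC =====
def Spec_deduplicate_umis (barcode_umi_gene_tuples : List (String × String × String)) (out : List (String × List (String × Int))) : Prop := out = deduplicate_umis_alt barcode_umi_gene_tuples
instance (barcode_umi_gene_tuples : List (String × String × String)) (out : List (String × List (String × Int))) : Decidable (Spec_deduplicate_umis barcode_umi_gene_tuples out) := by unfold Spec_deduplicate_umis; infer_instance

-- ===== CLAIM (what is proved, stated in full; the proofs are below) =====
def Claim_equal_deduplicate_umis : Prop := ∀ (barcode_umi_gene_tuples : List (String × String × String)), Dom_deduplicate_umis barcode_umi_gene_tuples → Spec_deduplicate_umis barcode_umi_gene_tuples (deduplicate_umis barcode_umi_gene_tuples)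

-- ===== LEMMAS AND PROOFS =====

-- map a function over the values of a dict, keeping keys and order
def pvMapVal {ν ν' : Type} (f : ν → ν') (d : PySem.Dict String ν) : PySem.Dict String ν' :=
  PySem.Dict.mk (d.items.map (fun p => (p.1, f p.2)))

-- the inner and outer value maps relating A's grouping dict to B's counts dict
def pvLenI (inner : PySem.Dict String (PySem.Set String)) : PySem.Dict String Int :=
  pvMapVal (fun s => (s.length : Int)) inner

def pvLenO (d : PySem.Dict String (PySem.Dict String (PySem.Set String))) : PySem.Dict String (PySem.Dict String Int) :=
  pvMapVal pvLenI d

lemma pvContains_mapVal {ν ν' : Type} (f : ν → ν') (d : PySem.Dict String ν) (k : String) :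
    (pvMapVal f d).contains k = d.contains k := by
  simp [pvMapVal, PySem.Dict.contains, List.any_map, Function.comp_def]

lemma pvGet?_mapVal {ν ν' : Type} (f : ν → ν') (d : PySem.Dict String ν) (k : String) :
    (pvMapVal f d).get? k = (d.get? k).map f := by
  simp only [pvMapVal, PySem.Dict.get?, List.find?_map]
  cases h : List.find? ((fun p => p.1 == k) ∘ (fun p => (p.1, f p.2))) d.items with
  | none =>
    have : List.find? (fun p => p.1 == k) d.items = none := by
      simpa [Function.comp] using h
    simp [this]
  | some e =>
    have : List.find? (fun p => p.1 == k) d.items = some e := by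
      simpa [Function.comp] using h
    simp [this]

lemma pvInsert_mapVal {ν ν' : Type} (f : ν → ν') (d : PySem.Dict String ν) (k : String) (v : ν) :
    pvMapVal f (d.insert k v) = (pvMapVal f d).insert k (f v) := by
  simp only [PySem.Dict.insert, pvContains_mapVal]
  by_cases h : d.contains k = true
  · simp only [h, if_pos]
    apply PySem.Dict.ext
    simp only [pvMapVal, List.map_map]
    apply List.map_congr_left
    intro p _
    by_cases hk : p.1 == k <;> simp [hk, Function.comp]
  · simp only [h, if_neg, Bool.not_eq_true]
    apply PySem.Dict.ext
    simp [pvMapVal]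

-- inserting the value already stored at k is the identity (unique keys)
lemma pvInsert_get?_self {ν : Type} (d : PySem.Dict String ν) (k : String) (v : ν)
    (hnd : d.keys.Nodup) (h : d.get? k = some v) : d.insert k v = d := by
  have hc : d.contains k = true := by
    rw [PySem.Dict.contains_eq_isSome_get?, h]; rfl
  obtain ⟨e, he, hev⟩ : ∃ e, List.find? (fun p => p.1 == k) d.items = some e ∧ e.2 = v := by
    simp only [PySem.Dict.get?] at h
    cases hf : List.find? (fun p => p.1 == k) d.items with
    | none => simp [hf] at h
    | some e => exact ⟨e, rfl, by simpa [hf] using h⟩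
  have hek : e.1 = k := by simpa using List.find?_some he
  have hemem : e ∈ d.items := List.mem_of_find?_eq_some he
  simp only [PySem.Dict.insert, hc, if_pos]
  apply PySem.Dict.ext
  nth_rewrite 2 [show d.items = d.items.map id by simp]
  apply List.map_congr_left
  intro p hp
  by_cases hk : p.1 == k
  · have hpk : p.1 = k := by simpa using hk
    have : p = e := List.inj_on_of_nodup_map hnd hp hemem (by rw [hpk, hek])
    simp [this, ← hev, ← hek]
  · simp [hk]

-- the invariant tying A's grouping state to B's (seen, counts) state
def pvInv (d : PySem.Dict String (PySem.Dict String (PySem.Set String)))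
    (st : PySem.Set (String × String × String) × PySem.Dict String (PySem.Dict String Int)) : Prop :=
  st.2 = pvLenO d ∧ d.keys.Nodup ∧ (∀ p ∈ d.items, p.2.keys.Nodup) ∧
  (∀ b g u : String, PySem.Set.contains st.1 (b, g, u) = true ↔
    ∃ inner s, d.get? b = some inner ∧ inner.get? g = some s ∧ u ∈ s)


-- one loop iteration preserves the invariant
lemma pvStep_inv (d : PySem.Dict String (PySem.Dict String (PySem.Set String)))
    (st : PySem.Set (String × String × String) × PySem.Dict String (PySem.Dict String Int))
    (t : String × String × String) (h : pvInv d st) : pvInv (pvStepA d t) (pvStepB st t) := by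
  obtain ⟨b, u, g⟩ := t
  obtain ⟨hc, hnd, hinn, hseen⟩ := h
  by_cases hs : PySem.Set.contains st.1 (b, g, u) = true
  · -- the triple was seen before: both steps are the identity
    obtain ⟨inner, s, hb, hg, hu⟩ := (hseen b g u).mp hs
    have hinnd : inner.keys.Nodup := hinn _ (PySem.Dict.mem_items_of_get?_eq_some d hb)
    have hA : pvStepA d (b, u, g) = d := by
      have h1 : d.getD b PySem.Dict.empty = inner := PySem.Dict.getD_of_get?_eq_some d _ hb
      have h2 : inner.getD g PySem.Set.empty = s := PySem.Dict.getD_of_get?_eq_some inner _ hg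
      have h3 : PySem.Set.add s u = s := by
        simp [PySem.Set.add, PySem.Set.contains, hu]
      simp only [pvStepA, h1, h2, h3, pvInsert_get?_self inner g s hinnd hg,
        pvInsert_get?_self d b inner hnd hb]
    have hB : pvStepB st (b, u, g) = st := by simp only [pvStepB]; rw [if_pos hs]
    rw [hA, hB]
    exact ⟨hc, hnd, hinn, hseen⟩
  · -- new triple
    have hsf : PySem.Set.contains st.1 (b, g, u) = false := by
      revert hs; cases PySem.Set.contains st.1 (b, g, u) <;> simp
    set inner := d.getD b PySem.Dict.empty with hinner
    set s := inner.getD g PySem.Set.empty with hsdef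
    -- decode membership in the locally fetched set back to the get?-chain on d
    have pvDecode : ∀ u0, u0 ∈ s →
        ∃ i0 s0, d.get? b = some i0 ∧ i0.get? g = some s0 ∧ u0 ∈ s0 := by
      intro u0 hmem
      cases hb0 : d.get? b with
      | none =>
        exfalso
        have he : inner = PySem.Dict.empty := by
          rw [hinner]; exact PySem.Dict.getD_of_get?_eq_none _ _ hb0
        have hse : s = PySem.Set.empty := by
          rw [hsdef, he]; rfl
        rw [hse] at hmem
        exact absurd hmem (List.not_mem_nil)
      | some i0 =>
        have hi0 : inner = i0 := by
          rw [hinner]; exact PySem.Dict.getD_of_get?_eq_some _ _ hb0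
        cases hg0 : inner.get? g with
        | none =>
          exfalso
          have hse : s = PySem.Set.empty := by
            rw [hsdef]; exact PySem.Dict.getD_of_get?_eq_none _ _ hg0
          rw [hse] at hmem
          exact absurd hmem (List.not_mem_nil)
        | some s0 =>
          have hs0 : s = s0 := by
            rw [hsdef]; exact PySem.Dict.getD_of_get?_eq_some _ _ hg0
          exact ⟨i0, s0, rfl, by rw [← hi0]; exact hg0, by rw [← hs0]; exact hmem⟩
    -- u is not in the stored set
    have hu : u ∉ s := fun hmem => hs ((hseen b g u).mpr (pvDecode u hmem))
    have haddset : PySem.Set.add s u = s ++ [u] := by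
      simp [PySem.Set.add, PySem.Set.contains, hu]
    -- B's inner counts dict is the value-mapped image of A's inner dict
    have hcinner : st.2.getD b PySem.Dict.empty = pvLenI inner := by
      rw [hc, PySem.Dict.getD_eq_get?_getD, pvLenO, pvGet?_mapVal]
      cases hb : d.get? b with
      | none =>
        have : inner = PySem.Dict.empty := by
          rw [hinner]; exact PySem.Dict.getD_of_get?_eq_none _ _ hb
        rw [this]; rfl
      | some i0 =>
        have : inner = i0 := by rw [hinner]; exact PySem.Dict.getD_of_get?_eq_some _ _ hb
        rw [this]; rfl
    have hccount : (pvLenI inner).getD g 0 = (s.length : Int) := by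
      rw [PySem.Dict.getD_eq_get?_getD, pvLenI, pvGet?_mapVal]
      cases hg : inner.get? g with
      | none =>
        have : s = PySem.Set.empty := by rw [hsdef]; exact PySem.Dict.getD_of_get?_eq_none _ _ hg
        rw [this]; rfl
      | some s0 =>
        have : s = s0 := by rw [hsdef]; exact PySem.Dict.getD_of_get?_eq_some _ _ hg
        rw [this]; rfl
    have hstepB : pvStepB st (b, u, g) =
        (st.1 ++ [(b, g, u)], st.2.insert b ((pvLenI inner).insert g ((s.length : Int) + 1))) := by
      simp only [pvStepB]
      rw [if_neg hs, hcinner, hccount]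
      have hnm : (b, g, u) ∉ st.1 := by
        simpa [PySem.Set.contains] using hsf
      simp [PySem.Set.add, PySem.Set.contains, hnm]
    have hstepA : pvStepA d (b, u, g) = d.insert b (inner.insert g (s ++ [u])) := by
      simp only [pvStepA]
      rw [← hinner, ← hsdef, haddset]
    rw [hstepA, hstepB]
    refine ⟨?_, ?_, ?_, ?_⟩
    · -- counts component
      show st.2.insert b ((pvLenI inner).insert g ((s.length : Int) + 1)) =
        pvLenO (d.insert b (inner.insert g (s ++ [u])))
      rw [hc]
      have h1 : pvLenO (d.insert b (inner.insert g (s ++ [u]))) =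
          (pvLenO d).insert b (pvLenI (inner.insert g (s ++ [u]))) := pvInsert_mapVal _ _ _ _
      have h2 : pvLenI (inner.insert g (s ++ [u])) =
          (pvLenI inner).insert g (((s ++ [u]).length : Int)) := pvInsert_mapVal _ _ _ _
      rw [h1, h2]
      congr 2
      simp
    · exact PySem.Dict.nodup_keys_insert d b _ hnd
    · intro p hp
      rw [PySem.Dict.mem_items_insert] at hp
      rcases hp with hp | ⟨hp, _⟩
      · subst hp
        apply PySem.Dict.nodup_keys_insert
        cases hb : d.get? b with
        | none =>
          have : inner = PySem.Dict.empty := by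
            rw [hinner]; exact PySem.Dict.getD_of_get?_eq_none _ _ hb
          rw [this]; exact PySem.Dict.nodup_keys_empty
        | some i0 =>
          have : inner = i0 := by rw [hinner]; exact PySem.Dict.getD_of_get?_eq_some _ _ hb
          rw [this]; exact hinn _ (PySem.Dict.mem_items_of_get?_eq_some d hb)
      · exact hinn _ hp
    · -- the seen-set characterisation
      intro b' g' u'
      have hlhs : PySem.Set.contains (st.1 ++ [(b, g, u)]) (b', g', u') = true ↔
          PySem.Set.contains st.1 (b', g', u') = true ∨ (b', g', u') = (b, g, u) := by
        simp [PySem.Set.contains]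
      rw [hlhs]
      by_cases hbb : b' = b
      · subst hbb
        rw [PySem.Dict.get?_insert_self]
        constructor
        · rintro (hold | heq)
          · obtain ⟨i0, s0, hb0, hg0, hu0⟩ := (hseen b' g' u').mp hold
            have hi0 : inner = i0 := by
              rw [hinner]; exact PySem.Dict.getD_of_get?_eq_some _ _ hb0
            by_cases hgg : g' = g
            · subst hgg
              have hs0 : s = s0 := by
                rw [hsdef, hi0]; exact PySem.Dict.getD_of_get?_eq_some _ _ hg0
              exact ⟨_, s ++ [u], rfl, PySem.Dict.get?_insert_self _ _ _,
                List.mem_append_left _ (by rw [hs0]; exact hu0)⟩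
            · exact ⟨_, s0, rfl,
                by rw [PySem.Dict.get?_insert, if_neg hgg, hi0]; exact hg0, hu0⟩
          · obtain ⟨hg'', hu''⟩ : g' = g ∧ u' = u := by
              simpa [Prod.ext_iff] using heq
            exact ⟨_, s ++ [u], rfl,
              by rw [hg'']; exact PySem.Dict.get?_insert_self _ _ _,
              by rw [hu'']; exact List.mem_append_right _ (by simp)⟩
        · rintro ⟨i', s', hi', hs', hu'⟩
          injection hi' with h0
          subst h0
          by_cases hgg : g' = g
          · subst hgg
            rw [PySem.Dict.get?_insert_self] at hs'
            injection hs' with h2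
            subst h2
            rcases List.mem_append.mp hu' with hin | hin
            · exact Or.inl ((hseen b' g' u').mpr (pvDecode u' hin))
            · right
              simp at hin
              simp [hin]
          · rw [PySem.Dict.get?_insert, if_neg hgg] at hs'
            left
            apply (hseen b' g' u').mpr
            cases hb0 : d.get? b' with
            | none =>
              exfalso
              have he : inner = PySem.Dict.empty := by
                rw [hinner]; exact PySem.Dict.getD_of_get?_eq_none _ _ hb0
              rw [he] at hs'
              simp [PySem.Dict.get?_empty] at hs'
            | some i0 =>
              have hi0 : inner = i0 := by
                rw [hinner]; exact PySem.Dict.getD_of_get?_eq_some _ _ hb0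
              exact ⟨i0, s', rfl, by rw [← hi0]; exact hs', hu'⟩
      · have hrw : (d.insert b (inner.insert g (s ++ [u]))).get? b' = d.get? b' := by
          rw [PySem.Dict.get?_insert, if_neg hbb]
        rw [hrw]
        constructor
        · rintro (hold | heq)
          · exact (hseen b' g' u').mp hold
          · exfalso; exact hbb (by injection heq)
        · intro hx
          exact Or.inl ((hseen b' g' u').mpr hx)


-- the invariant holds of the two initial states and is preserved by the whole pass
lemma pvFold_inv (ts : List (String × String × String))
    (d : PySem.Dict String (PySem.Dict String (PySem.Set String)))
    (st : PySem.Set (String × String × String) × PySem.Dict String (PySem.Dict String Int))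
    (h : pvInv d st) : pvInv (ts.foldl pvStepA d) (ts.foldl pvStepB st) := by
  induction ts generalizing d st with
  | nil => exact h
  | cons t ts ih => exact ih _ _ (pvStep_inv d st t h)

lemma pvInv_init : pvInv PySem.Dict.empty (PySem.Set.empty, PySem.Dict.empty) := by
  refine ⟨rfl, PySem.Dict.nodup_keys_empty, ?_, ?_⟩
  · intro p hp
    simp [PySem.Dict.empty] at hp
  · intro b g u
    simp [PySem.Set.contains, PySem.Set.empty, PySem.Dict.get?_empty]

-- a dict built from an association list with distinct keys has exactly that items list
lemma pvOfList_items {ν : Type} (l : List (String × ν)) (h : (l.map Prod.fst).Nodup) :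
    (PySem.Dict.ofList l).items = l := by
  have := PySem.Dict.items_foldl_insert_fresh l Prod.fst Prod.snd PySem.Dict.empty
    (fun a _ => PySem.Dict.contains_empty _) h
  simpa [PySem.Dict.ofList, PySem.Dict.update] using this

theorem deduplicate_umis_spec : Claim_equal_deduplicate_umis := by
  intro ts _
  have hinv := pvFold_inv ts PySem.Dict.empty (PySem.Set.empty, PySem.Dict.empty) pvInv_init
  obtain ⟨hc, hnd, hinn, -⟩ := hinv
  simp only [Spec_deduplicate_umis, deduplicate_umis, deduplicate_umis_alt]
  set bgU := ts.foldl pvStepA PySem.Dict.empty with hbgU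
  have hA : (bgU.items.foldl
        (fun c p => c.insert p.1 (PySem.Dict.ofList (p.2.items.map (fun q => (q.1, (q.2.length : Int))))))
        PySem.Dict.empty).items
      = bgU.items.map (fun p => (p.1, PySem.Dict.ofList (p.2.items.map (fun q => (q.1, (q.2.length : Int)))))) := by
    have := PySem.Dict.items_foldl_insert_fresh bgU.items Prod.fst
      (fun p => PySem.Dict.ofList (p.2.items.map (fun q => (q.1, (q.2.length : Int))))) PySem.Dict.empty
      (fun a _ => PySem.Dict.contains_empty _)
      (by simpa [PySem.Dict.keys] using hnd)
    simpa using this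
  rw [hc, hA, List.map_map]
  have hR : (pvLenO bgU).items = bgU.items.map (fun p => (p.1, pvLenI p.2)) := rfl
  rw [hR, List.map_map]
  apply List.map_congr_left
  intro p hp
  simp only [Function.comp]
  congr 1
  rw [pvOfList_items _ (by
    simpa [List.map_map, PySem.Dict.keys] using hinn p hp)]
  rfl
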